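-- pv_equiv track=rewrite | github.com/nikolaoskoutantos/Building-Efficiency-Tool | api/services/hvac_optimizer_service.py | _generate_notebook_operation
-- ===== SOURCE A (Python) =====
-- from typing import List, Tuple, Dict, Optional, Any
--
-- def _generate_notebook_operation(duration: int, switches, starting_operation: int) -> List[int]:
--     """Generate the raw notebook optimizer output (initial state + duration steps)."""
--     current = starting_operation
--     operation: List[int] = [current]
--     for i in range(duration):
--         if i in switches:
--             current ^= 1
--         operation.append(current)
--     return operation
-- ===== SOURCE B (Python) =====
-- def _generate_notebook_operation(duration, switches, starting_operation):
--     """Run-fill between switch points instead of per-step membership tests."""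
--     pts = sorted({s for s in switches if 0 <= s < duration})
--     out = [starting_operation]
--     current = starting_operation
--     cursor = 1
--     for s in pts:
--         out.extend([current] * (s + 1 - cursor))
--         current ^= 1
--         cursor = s + 1
--     out.extend([current] * (duration + 1 - cursor))
--     return out
-- ===== Notes on version B (the rewrite author's own statement) =====
-- stated objective: faster
-- what changed: Instead of testing 'i in switches' at every one of the duration steps, B sorts the distinct in-range switch indices once and fills the constant runs between consecutive switch points in bulk.
import Mathlib
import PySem

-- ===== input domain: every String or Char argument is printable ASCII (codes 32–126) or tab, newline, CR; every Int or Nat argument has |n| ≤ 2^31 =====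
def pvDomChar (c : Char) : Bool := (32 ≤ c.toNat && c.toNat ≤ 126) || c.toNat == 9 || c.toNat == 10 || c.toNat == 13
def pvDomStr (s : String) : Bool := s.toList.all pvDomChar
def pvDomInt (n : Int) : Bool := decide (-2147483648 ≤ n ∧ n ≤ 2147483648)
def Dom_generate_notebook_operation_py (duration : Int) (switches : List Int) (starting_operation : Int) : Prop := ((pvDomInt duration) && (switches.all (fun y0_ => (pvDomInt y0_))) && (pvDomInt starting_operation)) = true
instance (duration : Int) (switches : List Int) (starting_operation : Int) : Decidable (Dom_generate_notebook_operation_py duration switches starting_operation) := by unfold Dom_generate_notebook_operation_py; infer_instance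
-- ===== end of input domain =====

-- B replaces the per-step membership test with one sort of the distinct in-range
-- switch points and fills constant runs between them (objective: faster on many switches).

-- ===== PORT A =====
def generate_notebook_operation_py (duration : Int) (switches : List Int) (starting_operation : Int) : List Int :=
  ((PySem.List.pyRange 0 duration 1).foldl
    (fun (st : List Int × Int) i =>
      let current := if i ∈ switches then PySem.Int.bxor st.2 1 else st.2
      (st.1 ++ [current], current))
    ([starting_operation], starting_operation)).1

-- ===== PORT B =====
def generate_notebook_operation_py_alt (duration : Int) (switches : List Int) (starting_operation : Int) : List Int :=
  let pts := PySem.List.sorted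
    (PySem.Set.ofList (switches.filter (fun s => decide (0 ≤ s) && decide (s < duration))))
    (fun x => x) false
  let st := pts.foldl
    (fun (st : List Int × Int × Int) s =>
      (st.1 ++ List.replicate (s + 1 - st.2.2).toNat st.2.1, PySem.Int.bxor st.2.1 1, s + 1))
    ([starting_operation], starting_operation, 1)
  st.1 ++ List.replicate (duration + 1 - st.2.2).toNat st.2.1

-- ===== PRECONDITION & SPEC =====
def Spec_generate_notebook_operation_py (duration : Int) (switches : List Int) (starting_operation : Int) (out : List Int) : Prop := out = generate_notebook_operation_py_alt duration switches starting_operation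
instance (duration : Int) (switches : List Int) (starting_operation : Int) (out : List Int) : Decidable (Spec_generate_notebook_operation_py duration switches starting_operation out) := by unfold Spec_generate_notebook_operation_py; infer_instance

-- ===== CLAIM (what is proved, stated in full; the proofs are below) =====
def Claim_equal_generate_notebook_operation_py : Prop := ∀ (duration : Int) (switches : List Int) (starting_operation : Int), Dom_generate_notebook_operation_py duration switches starting_operation → Spec_generate_notebook_operation_py duration switches starting_operation (generate_notebook_operation_py duration switches starting_operation)

-- ===== LEMMAS AND PROOFS =====

-- A's loop as structural recursion: values for indices i+1 .. i+n.
def gA (sw : List Int) : Int → Nat → Int → List Int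
  | _, 0, _ => []
  | i, n + 1, c =>
    let c' := if i ∈ sw then PySem.Int.bxor c 1 else c
    c' :: gA sw (i + 1) n c'

-- B's run-filling as structural recursion: values for indices cur .. d.
def hB (d : Int) : Int → List Int → Int → List Int
  | cur, [], c => List.replicate (d + 1 - cur).toNat c
  | cur, s :: rest, c =>
    List.replicate (s + 1 - cur).toNat c ++ hB d (s + 1) rest (PySem.Int.bxor c 1)

theorem foldA (sw : List Int) (b : Int) :
    ∀ (n : Nat) (a : Int) (acc : List Int) (c : Int), n = (b - a).toNat →
    ((PySem.List.pyRange a b 1).foldl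
      (fun (st : List Int × Int) i =>
        let current := if i ∈ sw then PySem.Int.bxor st.2 1 else st.2
        (st.1 ++ [current], current)) (acc, c)).1 = acc ++ gA sw a n c := by
  intro n
  induction n with
  | zero =>
    intro a acc c h
    rw [PySem.List.pyRange_one_eq_nil (by omega)]
    simp [gA]
  | succ n ih =>
    intro a acc c h
    rw [PySem.List.pyRange_one_cons (by omega)]
    simp only [List.foldl_cons]
    rw [ih (a + 1) _ _ (by omega)]
    simp [gA, List.append_assoc]

theorem foldB (d : Int) :
    ∀ (pts : List Int) (acc : List Int) (c cur : Int),
    (let st := pts.foldl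
      (fun (st : List Int × Int × Int) s =>
        (st.1 ++ List.replicate (s + 1 - st.2.2).toNat st.2.1, PySem.Int.bxor st.2.1 1, s + 1))
      (acc, c, cur)
     st.1 ++ List.replicate (d + 1 - st.2.2).toNat st.2.1) = acc ++ hB d cur pts c := by
  intro pts
  induction pts with
  | nil => intro acc c cur; simp [hB]
  | cons s rest ih =>
    intro acc c cur
    simp only [List.foldl_cons]
    rw [ih]
    simp [hB, List.append_assoc]

theorem hB_step (d cur : Int) (pts : List Int) (c : Int)
    (hall : ∀ s ∈ pts, cur ≤ s) (hle : cur ≤ d) :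
    hB d cur pts c = c :: hB d (cur + 1) pts c := by
  cases pts with
  | nil =>
    show List.replicate (d + 1 - cur).toNat c = c :: List.replicate (d + 1 - (cur + 1)).toNat c
    rw [show (d + 1 - cur).toNat = (d + 1 - (cur + 1)).toNat + 1 by omega]
    rfl
  | cons s rest =>
    have hs : cur ≤ s := hall s (List.mem_cons_self ..)
    show List.replicate (s + 1 - cur).toNat c ++ _ = c :: (List.replicate (s + 1 - (cur + 1)).toNat c ++ _)
    rw [show (s + 1 - cur).toNat = (s + 1 - (cur + 1)).toNat + 1 by omega]
    rfl

theorem main_lemma (sw : List Int) (d : Int) :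
    ∀ (n : Nat) (i : Int) (c : Int) (pts : List Int),
    pts.Pairwise (· < ·) →
    (∀ s, s ∈ pts ↔ s ∈ sw ∧ i ≤ s ∧ s < d) →
    n = (d - i).toNat →
    hB d (i + 1) pts c = gA sw i n c := by
  intro n
  induction n with
  | zero =>
    intro i c pts _ hmem hn
    have hpts : pts = [] := by
      cases pts with
      | nil => rfl
      | cons s rest =>
        have := (hmem s).mp (List.mem_cons_self ..)
        omega
    subst hpts
    show List.replicate (d + 1 - (i + 1)).toNat c = gA sw i 0 c
    rw [show (d + 1 - (i + 1)).toNat = 0 by omega]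
    rfl
  | succ n ih =>
    intro i c pts hpw hmem hn
    have hid : i < d := by omega
    by_cases hin : i ∈ sw
    · -- i is a switch point; it must be the head of pts
      have himem : i ∈ pts := (hmem i).mpr ⟨hin, le_refl _, hid⟩
      cases pts with
      | nil => exact absurd himem (List.not_mem_nil)
      | cons p rest =>
        have hpi : i ≤ p := ((hmem p).mp (List.mem_cons_self ..)).2.1
        have hpeq : p = i := by
          rcases List.mem_cons.mp himem with h | h
          · omega
          · have := (List.pairwise_cons.mp hpw).1 i h; omega
        subst hpeq
        have hrest : ∀ s, s ∈ rest ↔ s ∈ sw ∧ p + 1 ≤ s ∧ s < d := by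
          intro s
          constructor
          · intro hs
            have h1 := (hmem s).mp (List.mem_cons_of_mem _ hs)
            have h2 := (List.pairwise_cons.mp hpw).1 s hs
            exact ⟨h1.1, by omega, h1.2.2⟩
          · intro ⟨h1, h2, h3⟩
            rcases List.mem_cons.mp ((hmem s).mpr ⟨h1, by omega, h3⟩) with h | h
            · omega
            · exact h
        have hallrest : ∀ s ∈ rest, p + 1 ≤ s := fun s hs => ((hrest s).mp hs).2.1
        show List.replicate (p + 1 - (p + 1)).toNat c ++ hB d (p + 1) rest (PySem.Int.bxor c 1) = _
        rw [show (p + 1 - (p + 1)).toNat = 0 by omega]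
        rw [List.replicate_zero, List.nil_append]
        rw [hB_step d (p + 1) rest _ hallrest (by omega)]
        rw [ih (p + 1) _ rest (List.pairwise_cons.mp hpw).2 hrest (by omega)]
        simp [gA, hin]
    · -- no switch at i: every point of pts is ≥ i + 1
      have hmem' : ∀ s, s ∈ pts ↔ s ∈ sw ∧ i + 1 ≤ s ∧ s < d := by
        intro s
        constructor
        · intro hs
          have h1 := (hmem s).mp hs
          have : s ≠ i := by rintro rfl; exact hin h1.1
          exact ⟨h1.1, by omega, h1.2.2⟩
        · intro ⟨h1, h2, h3⟩; exact (hmem s).mpr ⟨h1, by omega, h3⟩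
      have hall : ∀ s ∈ pts, i + 1 ≤ s := fun s hs => ((hmem' s).mp hs).2.1
      rw [hB_step d (i + 1) pts c hall (by omega)]
      rw [ih (i + 1) c pts hpw hmem' (by omega)]
      simp [gA, hin]

-- ===== VERDICT (by name: the statement is the Claim_ definition above) =====
theorem generate_notebook_operation_py_spec : Claim_equal_generate_notebook_operation_py := by
  intro d sw st _
  unfold Spec_generate_notebook_operation_py
  unfold generate_notebook_operation_py generate_notebook_operation_py_alt
  rw [foldA sw d ((d - 0).toNat) 0 [st] st rfl]
  rw [foldB d _ [st] st 1]
  have hpw : (PySem.List.sorted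
      (PySem.Set.ofList (sw.filter (fun s => decide (0 ≤ s) && decide (s < d))))
      (fun x => x) false).Pairwise (· < ·) := PySem.List.sorted_ofList_pairwise_lt ..
  have hmem : ∀ s, s ∈ PySem.List.sorted
      (PySem.Set.ofList (sw.filter (fun s => decide (0 ≤ s) && decide (s < d))))
      (fun x => x) false ↔ s ∈ sw ∧ (0 : Int) ≤ s ∧ s < d := by
    intro s
    rw [PySem.List.mem_sorted, PySem.Set.mem_ofList, List.mem_filter]
    simp
  have := main_lemma sw d ((d - 0).toNat) 0 st _ hpw hmem rfl
  rw [show (0 : Int) + 1 = 1 from rfl] at this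
  rw [this]
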